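-- pv_equiv track=rewrite | github.com/LucaTheSorcerer/PythonUniProjects | coding_exercises/matrices/uni_practice_tests.py | print_matrix_diagonally_downwards
-- ===== SOURCE A (Python) =====
-- def print_matrix_diagonally_downwards(matrix1):
--
--     starting_row_index = 0
--     endig_row_index = len(matrix1)
--     starting_column_index = 0
--     ending_columns_index = len(matrix1[0])
--
--     result = []
--
--     #I. Printing elements above and on second diagonal
--     for i in range(len(matrix1)):
--         for j in range(len(matrix1[0])):
--             if i + j < len(matrix1) - 1:
--                 result.append(matrix1[i][j])
--
--     for i in range(len(matrix1)):
--         for j in range(len(matrix1)):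
--             if i + j == len(matrix1) - 1:
--                 result.append(matrix1[i][j])
--
--     for i in range(len(matrix1)):
--         for j in range(len(matrix1)):
--             if i + j > len(matrix1) - 1:
--                 result.append(matrix1[i][j])
--
--     return result
-- ===== SOURCE B (Python) =====
-- def print_matrix_diagonally_downwards(matrix1):
--     n = len(matrix1)
--     upper, diag, lower = [], [], []
--     for i in range(n):
--         for j in range(n):
--             v = matrix1[i][j]
--             s = i + j
--             if s < n - 1:
--                 upper.append(v)
--             elif s == n - 1:
--                 diag.append(v)
--             else:
--                 lower.append(v)
--     return upper + diag + lower
-- ===== Notes on version B (the rewrite author's own statement) =====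
-- stated objective: faster
-- what changed: B replaces A's three separate full scans of the matrix (one per band) with a single pass that buckets each cell into upper/diagonal/lower lists by comparing i+j with n-1 and concatenates them at the end (one traversal instead of three).
import Mathlib
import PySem

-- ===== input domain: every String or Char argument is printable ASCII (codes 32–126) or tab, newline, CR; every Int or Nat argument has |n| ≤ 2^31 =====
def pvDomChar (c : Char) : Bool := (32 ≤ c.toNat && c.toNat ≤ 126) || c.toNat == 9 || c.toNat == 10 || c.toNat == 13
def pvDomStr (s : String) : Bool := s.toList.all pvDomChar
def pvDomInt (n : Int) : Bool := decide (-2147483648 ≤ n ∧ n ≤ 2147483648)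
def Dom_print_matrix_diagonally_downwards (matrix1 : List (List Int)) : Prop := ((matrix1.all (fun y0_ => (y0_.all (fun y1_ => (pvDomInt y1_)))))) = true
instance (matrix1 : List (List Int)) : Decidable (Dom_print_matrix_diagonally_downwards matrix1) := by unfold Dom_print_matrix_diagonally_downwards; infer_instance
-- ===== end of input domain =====

-- B makes one bucketing pass (upper/diagonal/lower lists, concatenated at the end) instead of
-- A's three separate full scans of the matrix; return-value equivalence is proved on Pre_.

-- ===== PORT A =====
-- literal transliteration of A: three i,j double loops appending into one result list;
-- pass 1 bounds j by len(matrix1[0]), passes 2 and 3 by len(matrix1)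
def print_matrix_diagonally_downwards (matrix1 : List (List Int)) : List Int :=
  let n : Int := matrix1.length
  let cols : Int := (PySem.List.pyGetD matrix1 0 ([] : List Int)).length
  let r1 : List Int :=
    (PySem.List.pyRange 0 n 1).foldl (fun acc i =>
      (PySem.List.pyRange 0 cols 1).foldl (fun acc j =>
        if i + j < n - 1 then
          acc ++ [PySem.List.pyGetD (PySem.List.pyGetD matrix1 i ([] : List Int)) j 0]
        else acc) acc) []
  let r2 : List Int :=
    (PySem.List.pyRange 0 n 1).foldl (fun acc i =>
      (PySem.List.pyRange 0 n 1).foldl (fun acc j =>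
        if i + j = n - 1 then
          acc ++ [PySem.List.pyGetD (PySem.List.pyGetD matrix1 i ([] : List Int)) j 0]
        else acc) acc) r1
  let r3 : List Int :=
    (PySem.List.pyRange 0 n 1).foldl (fun acc i =>
      (PySem.List.pyRange 0 n 1).foldl (fun acc j =>
        if i + j > n - 1 then
          acc ++ [PySem.List.pyGetD (PySem.List.pyGetD matrix1 i ([] : List Int)) j 0]
        else acc) acc) r2
  r3

-- ===== PORT B =====
-- literal transliteration of B: one i,j double loop maintaining the triple (upper, diag, lower)
def print_matrix_diagonally_downwards_alt (matrix1 : List (List Int)) : List Int :=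
  let n : Int := matrix1.length
  let t : List Int × List Int × List Int :=
    (PySem.List.pyRange 0 n 1).foldl (fun acc i =>
      (PySem.List.pyRange 0 n 1).foldl (fun (acc : List Int × List Int × List Int) j =>
        let v := PySem.List.pyGetD (PySem.List.pyGetD matrix1 i ([] : List Int)) j 0
        if i + j < n - 1 then (acc.1 ++ [v], acc.2.1, acc.2.2)
        else if i + j = n - 1 then (acc.1, acc.2.1 ++ [v], acc.2.2)
        else (acc.1, acc.2.1, acc.2.2 ++ [v])) acc) ([], [], [])
  t.1 ++ t.2.1 ++ t.2.2

-- ===== PRECONDITION & SPEC =====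
-- Pre_ is exactly where Python A returns normally: A raises IndexError on the empty matrix
-- (len(matrix1[0])) and whenever some row is shorter than the row count (passes 2/3 index
-- matrix1[i][j] for j up to len(matrix1)-1).
def Pre_print_matrix_diagonally_downwards (matrix1 : List (List Int)) : Prop :=
  matrix1 ≠ [] ∧ ∀ row ∈ matrix1, matrix1.length ≤ row.length
instance (matrix1 : List (List Int)) : Decidable (Pre_print_matrix_diagonally_downwards matrix1) := by unfold Pre_print_matrix_diagonally_downwards; infer_instance
def pvWitness_print_matrix_diagonally_downwards : List (List Int) := [[1, 2], [3, 4]]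


def Spec_print_matrix_diagonally_downwards (matrix1 : List (List Int)) (out : List Int) : Prop := out = print_matrix_diagonally_downwards_alt matrix1
instance (matrix1 : List (List Int)) (out : List Int) : Decidable (Spec_print_matrix_diagonally_downwards matrix1 out) := by unfold Spec_print_matrix_diagonally_downwards; infer_instance

-- ===== CLAIM (what is proved, stated in full; the proofs are below) =====
def Claim_equal_print_matrix_diagonally_downwards : Prop := ∀ (matrix1 : List (List Int)), Dom_print_matrix_diagonally_downwards matrix1 → Pre_print_matrix_diagonally_downwards matrix1 → Spec_print_matrix_diagonally_downwards matrix1 (print_matrix_diagonally_downwards matrix1)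

-- ===== LEMMAS AND PROOFS =====

-- Prop-condition form of the library's foldl_append_if (derived from it, not re-proved)
theorem pvFoldlAppIfProp (P : Int → Prop) [DecidablePred P] (g : Int → Int)
    (M : List Int) (acc : List Int) :
    M.foldl (fun acc j => if P j then acc ++ [g j] else acc) acc
      = acc ++ (M.filter (fun j => decide (P j))).map g := by
  simpa using PySem.List.foldl_append_if (fun j => decide (P j)) g M acc

-- B's inner bucketing loop, characterised by three filters
theorem pvBucketInner (n i : Int) (g : Int → Int) (M : List Int) (u d l : List Int) :
    M.foldl (fun (acc : List Int × List Int × List Int) j =>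
        if i + j < n - 1 then (acc.1 ++ [g j], acc.2.1, acc.2.2)
        else if i + j = n - 1 then (acc.1, acc.2.1 ++ [g j], acc.2.2)
        else (acc.1, acc.2.1, acc.2.2 ++ [g j])) (u, d, l)
      = (u ++ (M.filter (fun j => decide (i + j < n - 1))).map g,
         d ++ (M.filter (fun j => decide (i + j = n - 1))).map g,
         l ++ (M.filter (fun j => decide (i + j > n - 1))).map g) := by
  induction M generalizing u d l with
  | nil => simp
  | cons x xs ih =>
    simp only [List.foldl_cons, List.filter_cons, decide_eq_true_eq]
    by_cases h1 : i + x < n - 1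
    · rw [if_pos h1, if_pos h1, if_neg (by omega : ¬ i + x = n - 1),
        if_neg (by omega : ¬ i + x > n - 1), ih]
      simp
    · by_cases h2 : i + x = n - 1
      · rw [if_neg h1, if_pos h2, if_neg h1, if_pos h2,
          if_neg (by omega : ¬ i + x > n - 1), ih]
        simp
      · rw [if_neg h1, if_neg h2, if_neg h1, if_neg h2,
          if_pos (by omega : i + x > n - 1), ih]
        simp

-- B's outer loop over the triple accumulator
theorem pvBucketOuter (n : Int) (g : Int → Int → Int) (M L : List Int) (u d l : List Int) :
    L.foldl (fun acc i =>
        M.foldl (fun (acc : List Int × List Int × List Int) j =>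
          if i + j < n - 1 then (acc.1 ++ [g i j], acc.2.1, acc.2.2)
          else if i + j = n - 1 then (acc.1, acc.2.1 ++ [g i j], acc.2.2)
          else (acc.1, acc.2.1, acc.2.2 ++ [g i j])) acc) (u, d, l)
      = (u ++ L.flatMap (fun i => (M.filter (fun j => decide (i + j < n - 1))).map (g i)),
         d ++ L.flatMap (fun i => (M.filter (fun j => decide (i + j = n - 1))).map (g i)),
         l ++ L.flatMap (fun i => (M.filter (fun j => decide (i + j > n - 1))).map (g i))) := by
  induction L generalizing u d l with
  | nil => simp
  | cons x xs ih =>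
    simp only [List.foldl_cons, List.flatMap_cons]
    rw [pvBucketInner, ih]
    simp [List.append_assoc]

-- under Pre_, the column bound of A's first pass can be shrunk to the row count
theorem pvFilterShrink (n c i : Int) (h0 : 0 ≤ i) (hnc : n ≤ c) :
    (PySem.List.pyRange 0 c).filter (fun j => decide (i + j < n - 1))
      = (PySem.List.pyRange 0 n).filter (fun j => decide (i + j < n - 1)) := by
  by_cases hn : 0 ≤ n
  · have h2 : (PySem.List.pyRange n c).filter (fun j => decide (i + j < n - 1)) = [] :=
      List.filter_eq_nil_iff.mpr (by
        intro j hj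
        have := PySem.List.mem_pyRange_one.mp hj
        simp; omega)
    rw [PySem.List.pyRange_one_append 0 n c hn hnc, List.filter_append, h2, List.append_nil]
  · have h2 : (PySem.List.pyRange 0 c).filter (fun j => decide (i + j < n - 1)) = [] :=
      List.filter_eq_nil_iff.mpr (by
        intro j hj
        have := PySem.List.mem_pyRange_one.mp hj
        simp; omega)
    rw [h2, PySem.List.pyRange_one_eq_nil (by omega : n ≤ 0)]
    simp

-- ===== VERDICT (by name: the statement is the Claim_ definition above) =====
theorem print_matrix_diagonally_downwards_spec : Claim_equal_print_matrix_diagonally_downwards := by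
  intro matrix1 _ hpre
  obtain ⟨hne, hrows⟩ := hpre
  unfold Spec_print_matrix_diagonally_downwards
  unfold print_matrix_diagonally_downwards print_matrix_diagonally_downwards_alt
  simp only [pvFoldlAppIfProp, PySem.List.foldl_append_eq_flatMap, pvBucketOuter]
  have hlen : 0 < matrix1.length := List.length_pos_iff.mpr hne
  have hcols : (matrix1.length : Int) ≤ ((PySem.List.pyGetD matrix1 0 ([] : List Int)).length : Int) := by
    rw [PySem.List.pyGetD_eq_getElem matrix1 ([] : List Int) le_rfl (by exact_mod_cast hlen)]
    exact_mod_cast hrows _ (by simp [List.getElem_mem])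
  have hflat :
      (PySem.List.pyRange 0 (matrix1.length : Int)).flatMap (fun i =>
        ((PySem.List.pyRange 0 ((PySem.List.pyGetD matrix1 0 ([] : List Int)).length : Int)).filter
            (fun j => decide (i + j < (matrix1.length : Int) - 1))).map
          (fun j => PySem.List.pyGetD (PySem.List.pyGetD matrix1 i ([] : List Int)) j 0))
      = (PySem.List.pyRange 0 (matrix1.length : Int)).flatMap (fun i =>
        ((PySem.List.pyRange 0 (matrix1.length : Int)).filter
            (fun j => decide (i + j < (matrix1.length : Int) - 1))).map
          (fun j => PySem.List.pyGetD (PySem.List.pyGetD matrix1 i ([] : List Int)) j 0)) := by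
    apply List.flatMap_congr
    intro i hi
    rw [pvFilterShrink _ _ _ (PySem.List.mem_pyRange_one.mp hi).1 hcols]
  rw [hflat]
  simp [List.append_assoc]
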